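-- pv_equiv track=rewrite | github.com/TheRideout/AdventOfCode2021 | Day2_Dive/Day2.py | basic_navigation
-- ===== SOURCE A (Python) =====
-- def basic_navigation(data):
--     x = y = 0
--     for k, v in data:
--         if k == 'f':
--             x += v
--         if k == 'd':
--             y += v
--         if k == 'u':
--             y -= v
--     return x, y
-- ===== SOURCE B (Python) =====
-- def basic_navigation(data):
--     data = list(data)
--     x = sum(v for k, v in data if k == 'f')
--     y = sum(v for k, v in data if k == 'd') - sum(v for k, v in data if k == 'u')
--     return x, y
-- ===== Notes on version B (the rewrite author's own statement) =====
-- stated objective: simpler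
-- what changed: Replaces the single two-accumulator loop with three independent filtered sums, one per command kind, combined arithmetically.
import Mathlib
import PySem

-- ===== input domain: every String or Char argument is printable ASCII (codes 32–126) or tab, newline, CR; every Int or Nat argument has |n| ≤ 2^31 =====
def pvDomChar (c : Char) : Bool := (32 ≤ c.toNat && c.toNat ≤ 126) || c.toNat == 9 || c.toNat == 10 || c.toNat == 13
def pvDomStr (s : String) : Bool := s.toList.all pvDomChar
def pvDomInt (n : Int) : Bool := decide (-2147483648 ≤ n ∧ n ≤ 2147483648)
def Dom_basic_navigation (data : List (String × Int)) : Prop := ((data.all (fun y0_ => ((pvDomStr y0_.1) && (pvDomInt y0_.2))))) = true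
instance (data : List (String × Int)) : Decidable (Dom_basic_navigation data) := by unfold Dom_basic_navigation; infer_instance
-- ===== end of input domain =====

-- B computes each coordinate by independent filtered sums instead of one two-accumulator loop (simpler decomposition, same O(n)).


-- ===== PORT A =====
def basic_navigation (data : List (String × Int)) : Int × Int :=
  data.foldl (fun (s : Int × Int) kv =>
    let s1 := if kv.1 == "f" then (s.1 + kv.2, s.2) else s
    let s2 := if kv.1 == "d" then (s1.1, s1.2 + kv.2) else s1
    if kv.1 == "u" then (s2.1, s2.2 - kv.2) else s2) (0, 0)

-- ===== PORT B =====
def basic_navigation_alt (data : List (String × Int)) : Int × Int :=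
  let x := ((data.filter (fun kv => kv.1 == "f")).map (fun kv => kv.2)).sum
  let yd := ((data.filter (fun kv => kv.1 == "d")).map (fun kv => kv.2)).sum
  let yu := ((data.filter (fun kv => kv.1 == "u")).map (fun kv => kv.2)).sum
  (x, yd - yu)

-- ===== PRECONDITION & SPEC =====
def Spec_basic_navigation (data : List (String × Int)) (out : Int × Int) : Prop := out = basic_navigation_alt data
instance (data : List (String × Int)) (out : Int × Int) : Decidable (Spec_basic_navigation data out) := by unfold Spec_basic_navigation; infer_instance

-- ===== CLAIM (what is proved, stated in full; the proofs are below) =====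
def Claim_equal_basic_navigation : Prop := ∀ (data : List (String × Int)), Dom_basic_navigation data → Spec_basic_navigation data (basic_navigation data)

-- ===== LEMMAS AND PROOFS =====

-- generalized invariant: folding from state s adds B's per-kind sums componentwise
theorem nav_fold_shift (data : List (String × Int)) (s : Int × Int) :
    data.foldl (fun (s : Int × Int) kv =>
      let s1 := if kv.1 == "f" then (s.1 + kv.2, s.2) else s
      let s2 := if kv.1 == "d" then (s1.1, s1.2 + kv.2) else s1
      if kv.1 == "u" then (s2.1, s2.2 - kv.2) else s2) s
    = (s.1 + ((data.filter (fun kv => kv.1 == "f")).map (fun kv => kv.2)).sum,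
       s.2 + ((data.filter (fun kv => kv.1 == "d")).map (fun kv => kv.2)).sum
           - ((data.filter (fun kv => kv.1 == "u")).map (fun kv => kv.2)).sum) := by
  induction data generalizing s with
  | nil => simp
  | cons hd tl ih =>
    simp only [List.foldl_cons, List.filter_cons, ih]
    by_cases hf : hd.1 == "f" <;> by_cases hd' : hd.1 == "d" <;> by_cases hu : hd.1 == "u" <;>
      simp_all <;> ring

-- ===== VERDICT (by name: the statement is the Claim_ definition above) =====
theorem basic_navigation_spec : Claim_equal_basic_navigation := by
  intro data _
  unfold Spec_basic_navigation basic_navigation basic_navigation_alt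
  rw [nav_fold_shift]
  simp
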